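-- pv_equiv track=rewrite | github.com/LehighInfolab/DiffBond-V2 | DiffBond/check_edges.py | find_duplicate_nodes
-- ===== SOURCE A (Python) =====
-- from typing import Dict, List, Tuple, Set, Optional, Any
-- from collections import defaultdict
--
-- def find_duplicate_nodes(node_index: Dict[int, Tuple[str, str, str]]) -> Dict[Tuple[str, str], List[int]]:
--     """Find duplicate nodes where same (chain, resSeq) appears with different resName.
--
--     This indicates that insertion codes were lost during initial calculation.
--     For example: ('D', '30', 'THR') and ('D', '30', 'ASP') means '30' and '30a' were both
--     written as '30', losing the insertion code.
--
--     Args: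
--         node_index: Dictionary mapping index -> (chain, resSeq, resName)
--
--     Returns:
--         Dictionary mapping (chain, resSeq) -> list of indices with that position but different resName
--     """
--     position_to_indices = defaultdict(list)
--
--     for index, (chain, resseq, resname) in node_index.items():
--         # Use (chain, resSeq) as key - we want to find cases where same position
--         # has different residue names (indicating lost insertion codes)
--         position_key = (chain, resseq)
--         position_to_indices[position_key].append((index, resname))
--
--     # Filter to only positions with multiple nodes (potential duplicates)
--     # But only flag as duplicates if they have different resName
--     duplicates = {}
--     for pos, index_resname_list in position_to_indices.items():
--         if len(index_resname_list) > 1: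
--             # Check if there are different residue names at this position
--             resnames = set(resname for _, resname in index_resname_list)
--             if len(resnames) > 1:
--                 # Same (chain, resSeq) but different resName - this indicates lost insertion codes
--                 duplicates[pos] = [index for index, _ in index_resname_list]
--
--     return duplicates
-- ===== SOURCE B (Python) =====
-- def find_duplicate_nodes(node_index):
--     """Same result as A, computed without a grouping dict: collect the distinct
--     (chain, resSeq) positions in first-occurrence order, then scan the items once
--     per position to gather its group."""
--     items = list(node_index.items())
--     positions = list(dict.fromkeys((chain, resseq) for _, (chain, resseq, _) in items))
--     duplicates = {}
--     for key in positions: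
--         group = [(index, resname) for index, (chain, resseq, resname) in items
--                  if (chain, resseq) == key]
--         if len(group) > 1 and len({resname for _, resname in group}) > 1:
--             duplicates[key] = [index for index, _ in group]
--     return duplicates
-- ===== Notes on version B (the rewrite author's own statement) =====
-- stated objective: alternative
-- what changed: B builds no grouping dict: it dedups the (chain,resSeq) positions in first-occurrence order with dict.fromkeys and then, for each position, gathers its group by a direct filter scan of the items, emitting qualifying positions straight into the result.
import Mathlib
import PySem

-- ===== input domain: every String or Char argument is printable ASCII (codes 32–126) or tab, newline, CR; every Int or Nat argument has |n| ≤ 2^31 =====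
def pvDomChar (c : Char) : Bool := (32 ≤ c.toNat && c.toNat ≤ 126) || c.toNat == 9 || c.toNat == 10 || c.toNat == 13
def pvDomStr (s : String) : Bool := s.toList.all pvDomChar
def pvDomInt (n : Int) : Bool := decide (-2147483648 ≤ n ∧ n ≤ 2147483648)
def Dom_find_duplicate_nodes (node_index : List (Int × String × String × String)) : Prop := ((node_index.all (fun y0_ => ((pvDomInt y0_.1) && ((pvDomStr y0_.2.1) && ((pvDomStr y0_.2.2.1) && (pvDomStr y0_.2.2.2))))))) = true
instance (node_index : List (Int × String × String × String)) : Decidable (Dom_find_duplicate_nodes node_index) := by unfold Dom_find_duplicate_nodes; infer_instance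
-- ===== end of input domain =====

-- B replaces A's defaultdict grouping pass by a dedup of the positions followed by a
-- per-position filter scan (objective: alternative, same results, no grouping structure).

-- ===== PORT A =====
def find_duplicate_nodes (node_index : List (Int × String × String × String)) : List (String × String × List Int) :=
  let position_to_indices : PySem.Dict (String × String) (List (Int × String)) :=
    node_index.foldl
      (fun d q => d.modify (q.2.1, q.2.2.1) [] (fun v => v ++ [(q.1, q.2.2.2)]))
      PySem.Dict.empty
  let duplicates : PySem.Dict (String × String) (List Int) :=
    position_to_indices.items.foldl
      (fun dup p =>
        if p.2.length > 1 then
          if (PySem.Set.ofList (p.2.map (·.2))).length > 1 then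
            dup.insert p.1 (p.2.map (·.1))
          else dup
        else dup)
      PySem.Dict.empty
  duplicates.items.map (fun q => (q.1.1, q.1.2, q.2))

-- ===== PORT B =====
def find_duplicate_nodes_alt (node_index : List (Int × String × String × String)) : List (String × String × List Int) :=
  let positions : List (String × String) :=
    PySem.List.dedup (node_index.map (fun q => (q.2.1, q.2.2.1)))
  positions.foldl
    (fun res k =>
      let group : List (Int × String) :=
        (node_index.filter (fun q => (q.2.1, q.2.2.1) == k)).map (fun q => (q.1, q.2.2.2))
      if group.length > 1 ∧ (PySem.Set.ofList (group.map (·.2))).length > 1 then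
        res ++ [(k.1, k.2, group.map (·.1))]
      else res)
    []

-- ===== PRECONDITION & SPEC =====
def Spec_find_duplicate_nodes (node_index : List (Int × String × String × String)) (out : List (String × String × List Int)) : Prop := out = find_duplicate_nodes_alt node_index
instance (node_index : List (Int × String × String × String)) (out : List (String × String × List Int)) : Decidable (Spec_find_duplicate_nodes node_index out) := by unfold Spec_find_duplicate_nodes; infer_instance

-- ===== CLAIM (what is proved, stated in full; the proofs are below) =====
def Claim_equal_find_duplicate_nodes : Prop := ∀ (node_index : List (Int × String × String × String)), Dom_find_duplicate_nodes node_index → Spec_find_duplicate_nodes node_index (find_duplicate_nodes node_index)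

-- ===== LEMMAS AND PROOFS =====

-- the group of items at position k, shared normal form of both sides
def pvGroup (l : List (Int × String × String × String)) (k : String × String) : List (Int × String) :=
  (l.filter (fun q => (q.2.1, q.2.2.1) == k)).map (fun q => (q.1, q.2.2.2))

-- qualifying condition, as a Bool
def pvCond (g : List (Int × String)) : Bool :=
  decide (g.length > 1) && decide ((PySem.Set.ofList (g.map (·.2))).length > 1)

-- a fold inserting at pairwise-distinct fresh keys, guarded by a condition, appends
lemma items_foldl_insert_if {K V W : Type} [BEq K] [LawfulBEq K]
    (P : K × V → Bool) (f : K × V → W)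
    (ps : List (K × V)) (d : PySem.Dict K W)
    (hn : (ps.map (·.1)).Nodup) (hd : ∀ p ∈ ps, d.contains p.1 = false) :
    (ps.foldl (fun d p => if P p then d.insert p.1 (f p) else d) d).items
      = d.items ++ (ps.filter P).map (fun p => (p.1, f p)) := by
  induction ps generalizing d with
  | nil => simp
  | cons p ps ih =>
    simp only [List.map_cons, List.nodup_cons] at hn
    have hfresh : ∀ q ∈ ps, (d.insert p.1 (f p)).contains q.1 = false := by
      intro q hq
      rw [PySem.Dict.contains_insert]
      have h1 : d.contains q.1 = false := hd q (List.mem_cons_of_mem _ hq)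
      have h2 : (q.1 == p.1) = false := by
        simp only [beq_eq_false_iff_ne, ne_eq]
        intro h; exact hn.1 (h ▸ List.mem_map_of_mem hq)
      simp [h1, h2]
    by_cases hP : P p = true
    · simp only [List.foldl_cons, hP, if_true, List.filter_cons]
      rw [ih (d.insert p.1 (f p)) hn.2 hfresh,
          PySem.Dict.items_insert_of_not_contains (h := hd p List.mem_cons_self)]
      simp
    · simp only [Bool.not_eq_true] at hP
      simp only [List.foldl_cons, hP, Bool.false_eq_true, if_false, List.filter_cons]
      rw [ih d hn.2 (fun q hq => hd q (List.mem_cons_of_mem _ hq))]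

-- both results in one normal form: the qualifying positions, in first-occurrence order
lemma A_norm (l : List (Int × String × String × String)) :
    find_duplicate_nodes l
      = ((PySem.List.dedup (l.map (fun q => (q.2.1, q.2.2.1)))).filter
            (fun k => pvCond (pvGroup l k))).map
          (fun k => (k.1, k.2, (pvGroup l k).map (·.1))) := by
  unfold find_duplicate_nodes
  dsimp only
  have hkeys : (l.foldl
      (fun d q => d.modify (q.2.1, q.2.2.1) [] (fun v => v ++ [(q.1, q.2.2.2)]))
      PySem.Dict.empty).keys = PySem.List.dedup (l.map (fun q => (q.2.1, q.2.2.1))) := by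
    rw [PySem.Dict.keys_foldl_modify_key l (fun q => (q.2.1, q.2.2.1)) []
        (fun _ q => fun v => v ++ [(q.1, q.2.2.2)]) PySem.Dict.empty]
    simp [PySem.Set.update_nil_left, PySem.List.dedup_eq_ofList]
  have hnd : (l.foldl
      (fun d q => d.modify (q.2.1, q.2.2.1) [] (fun v => v ++ [(q.1, q.2.2.2)]))
      PySem.Dict.empty).keys.Nodup :=
    PySem.Dict.nodup_keys_foldl_modify_key l (fun q => (q.2.1, q.2.2.1)) []
      (fun _ q => fun v => v ++ [(q.1, q.2.2.2)]) PySem.Dict.empty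
      (by simp)
  have hgetD : ∀ k, (l.foldl
      (fun d q => d.modify (q.2.1, q.2.2.1) [] (fun v => v ++ [(q.1, q.2.2.2)]))
      PySem.Dict.empty).getD k [] = pvGroup l k := by
    intro k
    have h := PySem.Dict.getD_foldl_modify_append
      (l.map (fun q => ((q.2.1, q.2.2.1), (q.1, q.2.2.2)))) PySem.Dict.empty k
    rw [List.foldl_map] at h
    simpa [pvGroup, List.filter_map, Function.comp, List.map_map] using h
  have hitems : (l.foldl
      (fun d q => d.modify (q.2.1, q.2.2.1) [] (fun v => v ++ [(q.1, q.2.2.2)]))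
      PySem.Dict.empty).items
      = (PySem.List.dedup (l.map (fun q => (q.2.1, q.2.2.1)))).map
          (fun k => (k, pvGroup l k)) := by
    rw [PySem.Dict.items_eq_map_keys _ hnd [], hkeys]
    simp only [hgetD]
  rw [hitems]
  have hstep : (fun (dup : PySem.Dict (String × String) (List Int))
        (p : (String × String) × List (Int × String)) =>
        if p.2.length > 1 then
          if (PySem.Set.ofList (p.2.map (·.2))).length > 1 then
            dup.insert p.1 (p.2.map (·.1))
          else dup
        else dup)
      = (fun dup p => if pvCond p.2 then dup.insert p.1 (p.2.map (·.1)) else dup) := by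
    funext dup p
    by_cases h1 : p.2.length > 1 <;>
      by_cases h2 : (PySem.Set.ofList (p.2.map (·.2))).length > 1 <;>
        simp [pvCond, h1, h2]
  rw [hstep, items_foldl_insert_if (fun p => pvCond p.2) (fun p => p.2.map (·.1)) _ _
        (by simp [List.map_map, Function.comp_def, PySem.List.dedup_eq_ofList,
              PySem.Set.nodup_ofList])
        (by simp)]
  simp [List.filter_map, List.map_map, Function.comp_def, PySem.Dict.empty]

lemma B_norm (l : List (Int × String × String × String)) :
    find_duplicate_nodes_alt l
      = ((PySem.List.dedup (l.map (fun q => (q.2.1, q.2.2.1)))).filter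
            (fun k => pvCond (pvGroup l k))).map
          (fun k => (k.1, k.2, (pvGroup l k).map (·.1))) := by
  unfold find_duplicate_nodes_alt
  dsimp only
  have hstep : (fun (res : List (String × String × List Int)) (k : String × String) =>
        if ((l.filter (fun q => (q.2.1, q.2.2.1) == k)).map (fun q => (q.1, q.2.2.2))).length > 1
            ∧ (PySem.Set.ofList (((l.filter (fun q => (q.2.1, q.2.2.1) == k)).map
                (fun q => (q.1, q.2.2.2))).map (·.2))).length > 1 then
          res ++ [(k.1, k.2, ((l.filter (fun q => (q.2.1, q.2.2.1) == k)).map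
            (fun q => (q.1, q.2.2.2))).map (·.1))]
        else res)
      = (fun res k => if (fun k => pvCond (pvGroup l k)) k = true then
          res ++ [(fun k => (k.1, k.2, (pvGroup l k).map (·.1))) k] else res) := by
    funext res k
    by_cases h1 : (pvGroup l k).length > 1 <;>
      by_cases h2 : (PySem.Set.ofList ((pvGroup l k).map (·.2))).length > 1 <;>
        simp [pvCond, pvGroup]
  rw [hstep, PySem.List.foldl_append_if]
  simp

-- ===== VERDICT (by name: the statement is the Claim_ definition above) =====
theorem find_duplicate_nodes_spec : Claim_equal_find_duplicate_nodes := by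
  intro l _
  show find_duplicate_nodes l = find_duplicate_nodes_alt l
  rw [A_norm, B_norm]
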